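-- pv_equiv track=rewrite | github.com/lnahyun/Study_codingtest | jinje/Re1/solution3/solution3.py | check_y
-- ===== SOURCE A (Python) =====
-- def check_y(x, y, city_map, arr):
--     if city_map[x][y] == 2:
--         if y > 0:
--             return check_y(x, y-1, city_map, arr)
--         else:
--             return 0
--     else:
--         return arr[x][y]
-- ===== SOURCE B (Python) =====
-- def check_y(x, y, city_map, arr):
--     row = city_map[x]
--     for j in range(y, -1, -1):
--         if row[j] != 2:
--             return arr[x][j]
--     return 0
-- ===== Notes on version B (the rewrite author's own statement) =====
-- stated objective: simpler
-- what changed: Replaces the tail recursion with a single downward range scan of the row that returns arr[x][j] at the first non-2 cell and 0 if none is found down to column 0.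
-- outside the precondition, e.g. on check_y(0, -1, [[2, 3]], [[5, 6]]): A returns 6, B returns 0; on check_y(0, 1, [[3, 2]], [[7]]): A returns 7, B returns 7
import Mathlib
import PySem

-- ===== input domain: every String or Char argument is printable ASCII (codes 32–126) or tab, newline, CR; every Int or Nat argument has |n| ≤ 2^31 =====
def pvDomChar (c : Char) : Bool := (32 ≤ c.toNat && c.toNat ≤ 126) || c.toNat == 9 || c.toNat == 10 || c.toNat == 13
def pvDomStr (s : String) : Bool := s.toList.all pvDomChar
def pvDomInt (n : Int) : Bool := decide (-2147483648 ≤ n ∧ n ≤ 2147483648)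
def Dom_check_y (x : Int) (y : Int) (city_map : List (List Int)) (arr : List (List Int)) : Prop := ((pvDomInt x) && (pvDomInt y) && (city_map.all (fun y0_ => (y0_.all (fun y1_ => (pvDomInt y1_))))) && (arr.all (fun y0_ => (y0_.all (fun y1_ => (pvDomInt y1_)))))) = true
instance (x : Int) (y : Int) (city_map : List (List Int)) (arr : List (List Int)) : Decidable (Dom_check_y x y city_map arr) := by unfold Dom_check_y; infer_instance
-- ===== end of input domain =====

-- B replaces A's tail recursion by a single downward range scan of the row: return arr[x][j]
-- at the first non-2 cell, 0 if every cell down to column 0 is 2 (objective: simpler).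
-- Equivalence is about the return value; neither program mutates its arguments.

-- ===== PORT A =====
def check_y (x : Int) (y : Int) (city_map : List (List Int)) (arr : List (List Int)) : Int :=
  if ((PySem.List.pyGet? city_map x).bind (fun r => PySem.List.pyGet? r y)) = some 2 then
    if y > 0 then check_y x (y - 1) city_map arr
    else 0
  else
    ((PySem.List.pyGet? arr x).bind (fun r => PySem.List.pyGet? r y)).getD 0
termination_by y.toNat
decreasing_by omega

-- ===== PORT B =====
-- the 'for j in range(y, -1, -1)' loop with its early return, as recursion over the range list
def check_y_scan (row : List Int) (arow : List Int) : List Int → Int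
  | [] => 0
  | j :: js =>
    if (PySem.List.pyGet? row j).getD 0 ≠ 2 then (PySem.List.pyGet? arow j).getD 0
    else check_y_scan row arow js

def check_y_alt (x : Int) (y : Int) (city_map : List (List Int)) (arr : List (List Int)) : Int :=
  let row := (PySem.List.pyGet? city_map x).getD []
  let arow := (PySem.List.pyGet? arr x).getD []
  check_y_scan row arow (PySem.List.pyRange y (-1) (-1))

-- ===== PRECONDITION & SPEC =====
-- Pre_ excludes (a) x or some visited index out of range, where A raises IndexError, and
-- (b) negative y, where A's negative-index wraparound walk is accidental and B naturally returns 0.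
-- The row-length bounds on y are slightly wider than strictly needed when the walk stops early
-- (stated this way to keep Pre_ closed-form; see the cites in the claim).
def Pre_check_y (x : Int) (y : Int) (city_map : List (List Int)) (arr : List (List Int)) : Prop :=
  PySem.Raise.InRange city_map.length x ∧ PySem.Raise.InRange arr.length x ∧
  0 ≤ y ∧ y < (((PySem.List.pyGet? city_map x).getD []).length : Int) ∧
  y < (((PySem.List.pyGet? arr x).getD []).length : Int)
instance (x : Int) (y : Int) (city_map : List (List Int)) (arr : List (List Int)) : Decidable (Pre_check_y x y city_map arr) := by unfold Pre_check_y; infer_instance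

def pvWitness_check_y : Int × Int × List (List Int) × List (List Int) :=
  (0, 1, [[2, 2], [3, 0]], [[5, 6], [7, 8]])

def Spec_check_y (x : Int) (y : Int) (city_map : List (List Int)) (arr : List (List Int)) (out : Int) : Prop := out = check_y_alt x y city_map arr
instance (x : Int) (y : Int) (city_map : List (List Int)) (arr : List (List Int)) (out : Int) : Decidable (Spec_check_y x y city_map arr out) := by unfold Spec_check_y; infer_instance

-- ===== CLAIM (what is proved, stated in full; the proofs are below) =====
def Claim_equal_check_y : Prop := ∀ (x : Int) (y : Int) (city_map : List (List Int)) (arr : List (List Int)), Dom_check_y x y city_map arr → Pre_check_y x y city_map arr → Spec_check_y x y city_map arr (check_y x y city_map arr)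

-- ===== LEMMAS AND PROOFS =====

lemma check_y_eq_scan (x : Int) (city_map arr : List (List Int)) (row arow : List Int)
    (hr : PySem.List.pyGet? city_map x = some row)
    (ha : PySem.List.pyGet? arr x = some arow) :
    ∀ n : Nat, (n : Int) < row.length → (n : Int) < arow.length →
      check_y x (n : Int) city_map arr =
        check_y_scan row arow (PySem.List.pyRange (n : Int) (-1) (-1)) := by
  intro n
  induction n with
  | zero =>
    intro h1 h2
    rw [show ((0 : Nat) : Int) = 0 from rfl]
    rw [PySem.List.pyRange_neg_one_cons (by norm_num),
        show (0 : Int) - 1 = -1 from rfl, PySem.List.pyRange_neg_one_eq_nil le_rfl]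
    rw [check_y]
    simp only [hr, Option.bind_some, check_y_scan]
    have hlt : 0 < row.length := by exact_mod_cast h1
    rw [PySem.List.pyGet?_zero]
    simp only [List.getElem?_eq_getElem hlt, Option.getD_some]
    by_cases hc : row[0] = 2
    · simp [hc]
    · simp [hc, ha]
  | succ n ih =>
    intro h1 h2
    have hpos : (0 : Int) < ((n + 1 : Nat) : Int) := by positivity
    rw [PySem.List.pyRange_neg_one_cons (by omega)]
    rw [check_y]
    simp only [hr, Option.bind_some, check_y_scan]
    have hltn : (n + 1 : Nat) < row.length := by exact_mod_cast h1
    rw [PySem.List.pyGet?_natCast]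
    simp only [List.getElem?_eq_getElem hltn, Option.getD_some]
    by_cases hc : row[n + 1] = 2
    · simp only [hc, ne_eq, not_true_eq_false, if_pos hpos]
      have hsub : ((n + 1 : Nat) : Int) - 1 = (n : Int) := by push_cast; ring
      rw [hsub]
      exact ih (by push_cast at h1 ⊢; omega) (by push_cast at h2 ⊢; omega)
    · simp [hc, ha]

theorem check_y_spec : Claim_equal_check_y := by
  intro x y city_map arr _hdom hpre
  obtain ⟨hx1, hx2, hy0, hy1, hy2⟩ := hpre
  unfold Spec_check_y check_y_alt
  obtain ⟨row, hr⟩ : ∃ row, PySem.List.pyGet? city_map x = some row := by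
    cases h : PySem.List.pyGet? city_map x with
    | none => exact absurd hx1 ((PySem.List.pyGet?_eq_none_iff _ _).mp h)
    | some r => exact ⟨r, rfl⟩
  obtain ⟨arow, ha⟩ : ∃ arow, PySem.List.pyGet? arr x = some arow := by
    cases h : PySem.List.pyGet? arr x with
    | none => exact absurd hx2 ((PySem.List.pyGet?_eq_none_iff _ _).mp h)
    | some r => exact ⟨r, rfl⟩
  rw [hr] at hy1
  rw [ha] at hy2
  simp only [hr, ha, Option.getD_some] at hy1 hy2 ⊢
  have hy : y = (y.toNat : Int) := by omega
  rw [hy]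
  exact check_y_eq_scan x city_map arr row arow hr ha y.toNat (by omega) (by omega)
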